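-- pv_equiv track=rewrite | github.com/SuchThatOne/Sudoku | generator.py | normal_partition
-- ===== SOURCE A (Python) =====
-- from math import sqrt
--
-- def normal_partition(n, timeout=1e8):
--     block_list = []
--     m = int(sqrt(n))
--     if m*m != n:
--         raise ValueError("n should be a square number!")
--     for i in range(m):
--         for j in range(m):
--             new_block = []
--             for x in range(m):
--                 for y in range(m):
--                     new_block.append((i*m+x, j*m+y))
--             block_list.append(new_block)
--     return block_list
-- ===== SOURCE B (Python) =====
-- from math import sqrt
--
-- def normal_partition(n, timeout=1e8):
--     # Single global row-major pass bucketing each cell into its block.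
--     m = int(sqrt(n))
--     if m * m != n:
--         raise ValueError("n should be a square number!")
--     blocks = [[] for _ in range(m * m)]
--     for r in range(n):
--         for c in range(n):
--             blocks[(r // m) * m + (c // m)].append((r, c))
--     return blocks
-- ===== Notes on version B (the rewrite author's own statement) =====
-- stated objective: alternative
-- what changed: Instead of four nested loops building each block's cells explicitly, B preallocates the m*m block buckets and makes one global row-major pass over all cells, appending each cell (r,c) to bucket (r//m)*m + (c//m); different state (buckets) and traversal order, same O(n^2) cost.
import Mathlib
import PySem

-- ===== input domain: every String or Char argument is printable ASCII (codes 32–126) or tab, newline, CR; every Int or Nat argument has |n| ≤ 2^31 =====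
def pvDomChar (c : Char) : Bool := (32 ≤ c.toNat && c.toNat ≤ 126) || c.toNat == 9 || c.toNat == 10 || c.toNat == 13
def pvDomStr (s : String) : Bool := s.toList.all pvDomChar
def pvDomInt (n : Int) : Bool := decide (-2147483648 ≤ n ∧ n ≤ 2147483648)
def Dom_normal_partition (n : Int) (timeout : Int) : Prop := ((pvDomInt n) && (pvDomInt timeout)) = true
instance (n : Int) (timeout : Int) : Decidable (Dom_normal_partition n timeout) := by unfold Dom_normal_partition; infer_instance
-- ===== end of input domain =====

-- B replaces A's four nested per-block loops by one preallocated bucket list and a single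
-- global row-major pass over all cells (alternative decomposition, same asymptotic cost).

-- ===== PORT A =====
-- int(sqrt(n)) for n ≥ 0 is ported as pvIsqrt n.toNat, the floor square root (exact wherever
-- A returns: on Pre_ n is a perfect square ≤ 2^31, where float sqrt is exact); both Pythons
-- compute it the same way.  Log-depth recursion (sqrt n from sqrt (n/4)) so that the kernel
-- can evaluate it; 64 levels cover every n < 4^64.
def pvIsqrtFuel : ℕ → ℕ → ℕ
  | 0, _ => 0
  | fuel + 1, n =>
    if n = 0 then 0
    else
      let r := 2 * pvIsqrtFuel fuel (n / 4)
      if (r + 1) * (r + 1) ≤ n then r + 1 else r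
def pvIsqrt (n : ℕ) : ℕ := pvIsqrtFuel 64 n

-- the 'raise ValueError' branch (non-square or negative n) returns [] and is excluded by Pre_.
def normal_partition (n : Int) (timeout : Int) : List (List (Int × Int)) :=
  let m : Int := Int.ofNat (pvIsqrt n.toNat)
  if m * m ≠ n then []
  else
    (PySem.List.pyRange 0 m 1).foldl (fun bl i =>
      (PySem.List.pyRange 0 m 1).foldl (fun bl j =>
        bl ++ [(PySem.List.pyRange 0 m 1).foldl (fun nb x =>
          (PySem.List.pyRange 0 m 1).foldl (fun nb y =>
            nb ++ [(i * m + x, j * m + y)]) nb) []]) bl) []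

-- ===== PORT B =====
def normal_partition_alt (n : Int) (timeout : Int) : List (List (Int × Int)) :=
  let m : Int := Int.ofNat (pvIsqrt n.toNat)
  if m * m ≠ n then []
  else
    (PySem.List.pyRange 0 n 1).foldl (fun bs r =>
      (PySem.List.pyRange 0 n 1).foldl (fun bs c =>
        bs.modify (PySem.Int.floordiv r m * m + PySem.Int.floordiv c m).toNat
          (· ++ [(r, c)])) bs)
      (List.replicate (m * m).toNat [])

-- ===== PRECONDITION & SPEC =====
-- Pre_ excludes exactly the inputs where A raises: negative n (math domain error in sqrt) and
-- non-square n (the explicit ValueError).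
def Pre_normal_partition (n : Int) (timeout : Int) : Prop :=
  0 ≤ n ∧ pvIsqrt n.toNat * pvIsqrt n.toNat = n.toNat
instance (n : Int) (timeout : Int) : Decidable (Pre_normal_partition n timeout) := by
  unfold Pre_normal_partition; infer_instance
def pvWitness_normal_partition : Int × Int := (9, 0)
def Spec_normal_partition (n : Int) (timeout : Int) (out : List (List (Int × Int))) : Prop := out = normal_partition_alt n timeout
instance (n : Int) (timeout : Int) (out : List (List (Int × Int))) : Decidable (Spec_normal_partition n timeout out) := by unfold Spec_normal_partition; infer_instance

-- ===== CLAIM (what is proved, stated in full; the proofs are below) =====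
def Claim_equal_normal_partition : Prop := ∀ (n : Int) (timeout : Int), Dom_normal_partition n timeout → Pre_normal_partition n timeout → Spec_normal_partition n timeout (normal_partition n timeout)

-- ===== LEMMAS AND PROOFS =====

theorem pvDivKey (M a s : ℕ) (hs : s < M) : (a * M + s) / M = a := by
  have hM : 0 < M := by omega
  rw [mul_comm a M, Nat.mul_add_div hM, Nat.div_eq_of_lt hs]
  omega

theorem pvRange_mul (a b : ℕ) :
    List.range (a * b) = (List.range a).flatMap (fun i => (List.range b).map (fun y => i * b + y)) := by
  induction a with
  | zero => simp
  | succ a ih =>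
    rw [Nat.succ_mul, List.range_add, ih, List.range_succ, List.flatMap_append,
      List.flatMap_singleton]

theorem pvFlatMap_pick {β : Type} (M j : ℕ) (hj : j < M) (F : ℕ → List β) :
    (List.range M).flatMap (fun b => if b = j then F b else []) = F j := by
  induction M with
  | zero => omega
  | succ M ih =>
    rw [List.range_succ, List.flatMap_append, List.flatMap_singleton]
    by_cases h : j = M
    · subst h
      have : (List.range j).flatMap (fun b => if b = j then F b else []) = [] := by
        rw [List.flatMap_eq_nil_iff]
        intro x hx
        simp only [List.mem_range] at hx
        simp [Nat.ne_of_lt hx]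
      simp [this]
    · have hj' : j < M := by omega
      rw [ih hj', if_neg (by omega), List.append_nil]

theorem pvFoldl_modify_getElem? {α β : Type} (idx : α → ℕ) (f : α → β) (L : List α)
    (bs : List (List β)) (k : ℕ) :
    (L.foldl (fun bs a => bs.modify (idx a) (· ++ [f a])) bs)[k]? =
      bs[k]?.map (fun l => l ++ (L.filter (fun a => idx a == k)).map f) := by
  induction L generalizing bs with
  | nil => cases h : bs[k]? <;> simp [h]
  | cons a L ih =>
    rw [List.foldl_cons, ih, List.getElem?_modify, List.filter_cons]
    by_cases h : idx a = k
    · cases hb : bs[k]? <;> simp [hb, h]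
    · cases hb : bs[k]? <;> simp [hb, h]

def pvBlock (M i j : ℕ) : List (Int × Int) :=
  (List.range M).flatMap (fun x => (List.range M).map
    (fun y => (((i * M + x : ℕ) : Int), ((j * M + y : ℕ) : Int))))

def pvCells (N : ℕ) : List (ℕ × ℕ) :=
  (List.range N).flatMap (fun r => (List.range N).map (fun c => (r, c)))

def pvIdx (M : ℕ) (rc : ℕ × ℕ) : ℕ := rc.1 / M * M + rc.2 / M

theorem pvPortA_form (M : ℕ) :
    List.foldl (fun bl i =>
      List.foldl (fun bl j =>
        bl ++ [List.foldl (fun nb x =>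
          List.foldl (fun nb y =>
            nb ++ [(i * (M : Int) + x, j * (M : Int) + y)]) nb (PySem.List.pyRange 0 (M : Int) 1)) []
          (PySem.List.pyRange 0 (M : Int) 1)]) bl (PySem.List.pyRange 0 (M : Int) 1)) []
      (PySem.List.pyRange 0 (M : Int) 1)
    = (List.range M).flatMap (fun i => (List.range M).map (fun j => pvBlock M i j)) := by
  simp only [PySem.List.pyRange_zero_nat, List.foldl_map,
    PySem.List.foldl_append_singleton_eq_map, PySem.List.foldl_append_eq_flatMap,
    List.nil_append]
  simp [pvBlock, Nat.cast_add, Nat.cast_mul]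

theorem pvPortB_form (M : ℕ) :
    List.foldl (fun bs r =>
      List.foldl (fun bs c =>
        bs.modify (PySem.Int.floordiv r (M : Int) * (M : Int) + PySem.Int.floordiv c (M : Int)).toNat
          (· ++ [(r, c)])) bs (PySem.List.pyRange 0 ((M * M : ℕ) : Int) 1))
      (List.replicate (M * M) []) (PySem.List.pyRange 0 ((M * M : ℕ) : Int) 1)
    = (pvCells (M * M)).foldl
        (fun bs rc => bs.modify (pvIdx M rc) (· ++ [((rc.1 : Int), (rc.2 : Int))]))
        (List.replicate (M * M) []) := by
  rw [pvCells, List.foldl_flatMap]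
  simp only [PySem.List.pyRange_zero_nat, List.foldl_map, PySem.Int.floordiv_natCast,
    pvIdx, ← Nat.cast_mul, ← Nat.cast_add, Int.toNat_natCast]

theorem pvCells_filter (M i j : ℕ) (hi : i < M) (hj : j < M) :
    ((pvCells (M * M)).filter (fun rc => pvIdx M rc == i * M + j)).map
      (fun rc => ((rc.1 : Int), (rc.2 : Int))) = pvBlock M i j := by
  have hM : 0 < M := by omega
  have key : ∀ a s, s < M → ((a * M + s = i * M + j) ↔ (a = i ∧ s = j)) := by
    intro a s hs
    constructor
    · intro h
      have ha : a = i := by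
        have h1 := pvDivKey M a s hs
        have h2 := pvDivKey M i j hj
        rw [← h1, h, h2]
      subst ha
      exact ⟨rfl, by omega⟩
    · rintro ⟨rfl, rfl⟩; rfl
  have col : ∀ r, r / M = i →
      (List.range (M * M)).filter (fun c => r / M * M + c / M == i * M + j) =
        (List.range M).map (fun y => j * M + y) := by
    intro r hr
    rw [pvRange_mul M M, List.filter_flatMap]
    have step : ∀ b ∈ List.range M,
        ((List.range M).map (fun y => b * M + y)).filter (fun c => r / M * M + c / M == i * M + j)
          = if b = j then (List.range M).map (fun y => b * M + y) else [] := by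
      intro b _
      rw [List.filter_map]
      have hpt : ∀ y ∈ List.range M,
          ((fun c => r / M * M + c / M == i * M + j) ∘ (fun y => b * M + y)) y = (b == j) := by
        intro y hy
        simp only [Function.comp, pvDivKey M b y (List.mem_range.mp hy), hr]
        by_cases h : b = j
        · simp [h]
        · simp [Nat.add_left_cancel_iff, h]
      rw [List.filter_congr hpt]
      by_cases h : b = j
      · simp [h]
      · simp [h]
    rw [List.flatMap_congr step, pvFlatMap_pick M j hj]
  have colN : ∀ r, r / M ≠ i →
      (List.range (M * M)).filter (fun c => r / M * M + c / M == i * M + j) = [] := by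
    intro r hr
    rw [List.filter_eq_nil_iff]
    intro c hc
    have hcM : c / M < M := (Nat.div_lt_iff_lt_mul hM).mpr (List.mem_range.mp hc)
    simp only [beq_iff_eq]
    intro heq
    exact hr ((key _ _ hcM).mp heq).1
  rw [pvCells, List.filter_flatMap]
  have rowstep : ∀ r ∈ List.range (M * M),
      ((List.range (M * M)).map (fun c => (r, c))).filter (fun rc => pvIdx M rc == i * M + j)
        = if r / M = i then (List.range M).map (fun y => (r, j * M + y)) else [] := by
    intro r _
    rw [List.filter_map]
    have hcomp : ((fun rc => pvIdx M rc == i * M + j) ∘ (fun c => (r, c)))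
        = (fun c => r / M * M + c / M == i * M + j) := rfl
    by_cases h : r / M = i
    · rw [hcomp, col r h, List.map_map, if_pos h]
      rfl
    · rw [hcomp, colN r h, if_neg h]
      rfl
  rw [List.flatMap_congr rowstep, pvRange_mul M M, List.flatMap_assoc]
  have rowpick : ∀ a ∈ List.range M,
      ((List.range M).map (fun x => a * M + x)).flatMap
          (fun r => if r / M = i then (List.range M).map (fun y => (r, j * M + y)) else [])
        = if a = i then (List.range M).flatMap
            (fun x => (List.range M).map (fun y => (a * M + x, j * M + y))) else [] := by
    intro a _
    rw [List.flatMap_map]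
    have hp : ∀ x ∈ List.range M,
        (if (a * M + x) / M = i then (List.range M).map (fun y => (a * M + x, j * M + y)) else [])
          = (if a = i then (List.range M).map (fun y => (a * M + x, j * M + y)) else []) := by
      intro x hx
      rw [pvDivKey M a x (List.mem_range.mp hx)]
    rw [List.flatMap_congr hp]
    by_cases h : a = i
    · simp [h]
    · simp [h]
  rw [List.flatMap_congr rowpick, pvFlatMap_pick M i hi, List.map_flatMap]
  rw [pvBlock]
  refine List.flatMap_congr (fun x _ => ?_)
  rw [List.map_map]
  rfl


theorem pvMain (n : Int) (timeout : Int) (hn0 : 0 ≤ n) (M : ℕ) (hIs : pvIsqrt n.toNat = M)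
    (hMsq : M * M = n.toNat) :
    normal_partition n timeout = normal_partition_alt n timeout := by
  have hn : n = ((M * M : ℕ) : Int) := by rw [hMsq]; exact (Int.toNat_of_nonneg hn0).symm
  subst hn
  simp only [Int.toNat_natCast] at hIs
  unfold normal_partition normal_partition_alt
  simp only [Int.toNat_natCast, hIs, Int.ofNat_eq_natCast, ← Nat.cast_mul, ne_eq,
    Nat.cast_inj, not_true_eq_false, if_false, reduceIte]
  rw [pvPortA_form, pvPortB_form]
  have hA : (List.range (M * M)).map (fun k => pvBlock M (k / M) (k % M))
      = (List.range M).flatMap (fun i => (List.range M).map (fun j => pvBlock M i j)) := by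
    rw [pvRange_mul M M, List.map_flatMap]
    refine List.flatMap_congr (fun a _ => ?_)
    rw [List.map_map]
    refine List.map_congr_left (fun y hy => ?_)
    have hyM := List.mem_range.mp hy
    simp only [Function.comp]
    rw [pvDivKey M a y hyM,
      show (a * M + y) % M = y by rw [mul_comm, Nat.mul_add_mod, Nat.mod_eq_of_lt hyM]]
  rw [← hA]
  refine List.ext_getElem? (fun k => ?_)
  rw [pvFoldl_modify_getElem? (pvIdx M) (fun rc => ((rc.1 : Int), (rc.2 : Int)))]
  by_cases hk : k < M * M
  · have hM : 0 < M := by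
      rcases Nat.eq_zero_or_pos M with h | h
      · subst h; omega
      · exact h
    have h1 : k / M < M := (Nat.div_lt_iff_lt_mul hM).mpr (by omega)
    have h2 : k % M < M := Nat.mod_lt _ hM
    have hfil := pvCells_filter M (k / M) (k % M) h1 h2
    rw [Nat.div_add_mod'] at hfil
    rw [List.getElem?_map, List.getElem?_range hk, List.getElem?_replicate, if_pos hk]
    simp only [Option.map_some, List.nil_append, hfil]
  · rw [List.getElem?_eq_none (by simpa using hk), List.getElem?_replicate, if_neg hk]
    rfl

-- ===== VERDICT (by name: the statement is the Claim_ definition above) =====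
theorem normal_partition_spec : Claim_equal_normal_partition := by
  intro n timeout _ hpre
  obtain ⟨hn0, hMsq⟩ := hpre
  unfold Spec_normal_partition
  exact pvMain n timeout hn0 (pvIsqrt n.toNat) rfl hMsq
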